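-- pv_equiv track=rewrite | github.com/Ace1928/eidosian_forge | archive_forge/src/archive_forge/func__slice_index.py | _slice_index
-- ===== SOURCE A (Python) =====
-- from typing import TYPE_CHECKING, Any, Callable, Dict, Iterator, List, Optional, Tuple, Union
--
-- def _slice_index(values: List, slices: int) -> Iterator[List]:
--     seq = list(values)
--     length = 0
--     for value in values:
--         length += 1 + len(value[1][1])
--     items_per_slice = length // slices
--     offset = 0
--     for slice_number in range(slices):
--         count = 0
--         start = offset
--         if slices == slice_number + 1:
--             offset = len(seq)
--         else:
--             for value in values[offset:]:
--                 count += 1 + len(value[1][1])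
--                 offset += 1
--                 if count >= items_per_slice:
--                     break
--         yield seq[start:offset]
-- ===== SOURCE B (Python) =====
-- def _slice_index(values, slices):
--     seq = list(values)
--     n = len(seq)
--     # prefix sums of the weights 1 + len(v[1][1]); P[0] = 0, P[n] = total weight
--     P = [0]
--     t = 0
--     for v in seq:
--         t += 1 + len(v[1][1])
--         P.append(t)
--     threshold = P[-1] // slices
--     start = 0
--     for slice_number in range(slices):
--         if slice_number == slices - 1:
--             end = n
--         else:
--             end = min(_bisect_ge(P, P[start] + threshold, start + 1, n + 1), n)
--         yield seq[start:end]
--         start = end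
--
--
-- def _bisect_ge(P, x, lo, hi):
--     # first index i in [lo, hi) with P[i] >= x, else hi (P is nondecreasing)
--     while lo < hi:
--         mid = (lo + hi) // 2
--         if P[mid] < x:
--             lo = mid + 1
--         else:
--             hi = mid
--     return lo
-- ===== Notes on version B (the rewrite author's own statement) =====
-- stated objective: alternative
-- what changed: Replaces A's per-slice linear boundary scans with a prefix-sum table built once plus a hand-written binary search (bisect_left) that locates each slice boundary; same overall linear cost since A never rescans.
import Mathlib
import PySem

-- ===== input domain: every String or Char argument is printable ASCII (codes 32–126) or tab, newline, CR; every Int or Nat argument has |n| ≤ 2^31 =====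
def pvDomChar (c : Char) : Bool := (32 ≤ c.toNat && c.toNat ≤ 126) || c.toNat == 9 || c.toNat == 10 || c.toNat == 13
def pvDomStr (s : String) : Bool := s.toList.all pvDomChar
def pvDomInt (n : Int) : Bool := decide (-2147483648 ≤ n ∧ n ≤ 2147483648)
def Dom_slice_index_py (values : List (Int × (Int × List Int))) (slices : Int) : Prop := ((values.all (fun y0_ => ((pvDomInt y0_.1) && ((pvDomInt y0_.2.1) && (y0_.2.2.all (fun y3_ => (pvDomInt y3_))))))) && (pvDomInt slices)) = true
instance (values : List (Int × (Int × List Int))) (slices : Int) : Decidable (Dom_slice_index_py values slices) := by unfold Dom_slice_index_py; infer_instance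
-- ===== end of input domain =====

-- B replaces A's per-slice linear boundary scan by a prefix-sum table built once plus a
-- hand-written binary search for each slice boundary (return value only; neither mutates).

abbrev pvT : Type := Int × (Int × List Int)

-- ===== PORT A =====
-- inner loop: `for value in values[offset:]: count += 1+len(value[1][1]); offset += 1; if count >= items: break`
def pvInnerA (items : Int) : List pvT → Int → Int → Int
  | [], _count, offset => offset
  | v :: rest, count, offset =>
      let count' := count + (1 + ((v.2.2.length : Int)))
      let offset' := offset + 1
      if items ≤ count' then offset' else pvInnerA items rest count' offset'

def slice_index_py (values : List (Int × (Int × List Int))) (slices : Int) : List (List (Int × (Int × List Int))) :=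
  let seq := values
  let length := values.foldl (fun acc v => acc + (1 + ((v.2.2.length : Int)))) 0
  let items := PySem.Int.floordiv length slices
  ((PySem.List.pyRange 0 slices 1).foldl
    (fun (st : Int × List (List pvT)) sn =>
      let offset := st.1
      let start := offset
      let offset' := if slices == sn + 1 then ((seq.length : Int))
                     else pvInnerA items (PySem.List.slice seq (some offset) none) 0 offset
      (offset', st.2 ++ [PySem.List.slice seq (some start) (some offset')]))
    (0, ([] : List (List pvT)))).2

-- ===== PORT B =====
-- prefix sums: `t += 1+len(v[1][1]); P.append(t)` — pvPrefix l t is the list appended after t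
def pvPrefix : List pvT → Int → List Int
  | [], _ => []
  | v :: rest, t =>
      let t' := t + (1 + ((v.2.2.length : Int)))
      t' :: pvPrefix rest t'

-- `while lo < hi: mid=(lo+hi)//2; if P[mid] < x: lo=mid+1 else: hi=mid`; indices are always
-- in range, so `getD` is exact for the Python indexing here
def pvBisectGe (P : List Int) (x : Int) (lo hi : Nat) : Nat :=
  if h : lo < hi then
    let mid := (lo + hi) / 2
    if P.getD mid 0 < x then pvBisectGe P x (mid + 1) hi else pvBisectGe P x lo mid
  else lo
termination_by hi - lo
decreasing_by all_goals omega

def slice_index_py_alt (values : List (Int × (Int × List Int))) (slices : Int) : List (List (Int × (Int × List Int))) :=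
  let seq := values
  let n := seq.length
  let P : List Int := 0 :: pvPrefix seq 0
  let threshold := PySem.Int.floordiv (P.getLastD 0) slices
  ((PySem.List.pyRange 0 slices 1).foldl
    (fun (st : Nat × List (List pvT)) sn =>
      let start := st.1
      let e := if sn == slices - 1 then n
               else min (pvBisectGe P (P.getD start 0 + threshold) (start + 1) (n + 1)) n
      (e, st.2 ++ [(seq.drop start).take (e - start)]))   -- seq[start:e], 0 ≤ start ≤ e ≤ n
    (0, ([] : List (List pvT)))).2

-- ===== PRECONDITION & SPEC =====
-- Pre_ excludes exactly slices = 0, where Python A raises ZeroDivisionError.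
def Pre_slice_index_py (values : List (Int × (Int × List Int))) (slices : Int) : Prop := slices ≠ 0
instance (values : List (Int × (Int × List Int))) (slices : Int) : Decidable (Pre_slice_index_py values slices) := by unfold Pre_slice_index_py; infer_instance

def pvWitness_slice_index_py : (List (Int × (Int × List Int))) × Int := ([(1, (2, [3])), (4, (5, []))], 2)

def Spec_slice_index_py (values : List (Int × (Int × List Int))) (slices : Int) (out : List (List (Int × (Int × List Int)))) : Prop := out = slice_index_py_alt values slices
instance (values : List (Int × (Int × List Int))) (slices : Int) (out : List (List (Int × (Int × List Int)))) : Decidable (Spec_slice_index_py values slices out) := by unfold Spec_slice_index_py; infer_instance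

-- ===== CLAIM (what is proved, stated in full; the proofs are below) =====
def Claim_equal_slice_index_py : Prop := ∀ (values : List (Int × (Int × List Int))) (slices : Int), Dom_slice_index_py values slices → Pre_slice_index_py values slices → Spec_slice_index_py values slices (slice_index_py values slices)

-- ===== LEMMAS AND PROOFS =====

-- weight of one element and total weight of a list
def pvW (v : pvT) : Int := 1 + ((v.2.2.length : Int))
def pvWsum (l : List pvT) : Int := (l.map pvW).sum

theorem pvWsum_nil : pvWsum [] = 0 := rfl
theorem pvWsum_cons (v : pvT) (l : List pvT) : pvWsum (v :: l) = pvW v + pvWsum l := by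
  simp [pvWsum]

theorem pvWsum_append (l₁ l₂ : List pvT) : pvWsum (l₁ ++ l₂) = pvWsum l₁ + pvWsum l₂ := by
  simp [pvWsum]

theorem pvW_pos (v : pvT) : 1 ≤ pvW v := by
  unfold pvW; omega

-- A's `length` accumulator is pvWsum
theorem pvFoldl_wsum (l : List pvT) (t : Int) :
    l.foldl (fun acc v => acc + (1 + ((v.2.2.length : Int)))) t = t + pvWsum l := by
  induction l generalizing t with
  | nil => simp [pvWsum]
  | cons v rest ih => simp [List.foldl, ih, pvWsum_cons, pvW]; ring

-- P[k] (k ≤ |l|) is t + weight of the first k elements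
theorem pvPrefix_getD (l : List pvT) (t : Int) (k : Nat) (hk : k ≤ l.length) :
    (t :: pvPrefix l t).getD k 0 = t + pvWsum (l.take k) := by
  induction l generalizing t k with
  | nil =>
    have : k = 0 := by simpa using hk
    subst this
    simp [pvPrefix, pvWsum]
  | cons v rest ih =>
    cases k with
    | zero => simp [pvWsum]
    | succ k =>
      have hk' : k ≤ rest.length := by simpa using hk
      simp only [pvPrefix, List.getD_cons_succ]
      rw [ih _ k hk']
      simp [List.take_succ_cons, pvWsum_cons, pvW]
      ring


theorem pvPrefix_getLastD (l : List pvT) (t : Int) :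
    (t :: pvPrefix l t).getLastD 0 = t + pvWsum l := by
  induction l generalizing t with
  | nil => simp [pvPrefix, pvWsum]
  | cons v rest ih =>
    simp only [pvPrefix, List.getLastD_cons]
    rw [show (pvPrefix rest (t + (1 + (v.2.2.length : Int)))).getLastD (t + (1 + (v.2.2.length : Int)))
        = ((t + (1 + (v.2.2.length : Int))) :: pvPrefix rest (t + (1 + (v.2.2.length : Int)))).getLastD 0
      from List.getLastD_cons.symm]
    rw [ih]
    simp [pvWsum_cons, pvW]
    ring

-- P is strictly increasing: P i + (j - i) ≤ P j
theorem pvP_mono (l : List pvT) (i j : Nat) (hij : i ≤ j) (hj : j ≤ l.length) :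
    (0 :: pvPrefix l 0).getD i 0 + (j - i : Nat) ≤ (0 :: pvPrefix l 0).getD j 0 := by
  rw [pvPrefix_getD l 0 i (le_trans hij hj), pvPrefix_getD l 0 j hj]
  have h1 : l.take j = l.take i ++ (l.drop i).take (j - i) := by
    rw [← List.take_add]; congr 1; omega
  rw [h1, pvWsum_append]
  have h3 : ((l.drop i).take (j - i)).length = j - i := by
    simp; omega
  have h2 : (((l.drop i).take (j - i)).length : Int) ≤ pvWsum ((l.drop i).take (j - i)) := by
    clear h1 h3
    induction ((l.drop i).take (j - i)) with
    | nil => simp [pvWsum]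
    | cons v rest ih =>
      have := pvW_pos v
      rw [pvWsum_cons]
      simp only [List.length_cons]
      push_cast
      omega
  rw [h3] at h2
  omega

-- binary-search specification
theorem pvBisect_aux (P : List Int) (x : Int) :
    ∀ (d lo hi : Nat), hi - lo ≤ d →
      (∀ i j, i ≤ j → j < hi → P.getD i 0 ≤ P.getD j 0) → lo ≤ hi →
      lo ≤ pvBisectGe P x lo hi ∧ pvBisectGe P x lo hi ≤ hi ∧
        (∀ i, lo ≤ i → i < pvBisectGe P x lo hi → P.getD i 0 < x) ∧
        (pvBisectGe P x lo hi < hi → x ≤ P.getD (pvBisectGe P x lo hi) 0) := by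
  intro d
  induction d with
  | zero =>
    intro lo hi hd hmono hlo
    have hq : ¬ lo < hi := by omega
    rw [pvBisectGe, dif_neg hq]
    exact ⟨le_refl _, hlo, fun i h1 h2 => by omega, fun h => by omega⟩
  | succ d ih =>
    intro lo hi hd hmono hlo
    by_cases h : lo < hi
    · rw [pvBisectGe, dif_pos h]
      simp only
      by_cases hc : P.getD ((lo + hi) / 2) 0 < x
      · rw [if_pos hc]
        obtain ⟨h1, h2, h3, h4⟩ := ih ((lo + hi) / 2 + 1) hi (by omega) hmono (by omega)
        refine ⟨by omega, h2, ?_, h4⟩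
        intro i hi1 hi2
        by_cases hge : (lo + hi) / 2 + 1 ≤ i
        · exact h3 i hge hi2
        · have := hmono i ((lo + hi) / 2) (by omega) (by omega)
          omega
      · rw [if_neg hc]
        obtain ⟨h1, h2, h3, h4⟩ :=
          ih lo ((lo + hi) / 2) (by omega)
            (fun i j hij hj => hmono i j hij (by omega)) (by omega)
        refine ⟨h1, by omega, h3, ?_⟩
        intro hr
        by_cases hlt : pvBisectGe P x lo ((lo + hi) / 2) < (lo + hi) / 2
        · exact h4 hlt
        · have heq : pvBisectGe P x lo ((lo + hi) / 2) = (lo + hi) / 2 := by omega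
          rw [heq]
          omega
    · rw [pvBisectGe, dif_neg h]
      exact ⟨le_refl _, hlo, fun i h1 h2 => by omega, fun hx => by omega⟩

theorem pvBisect_spec (P : List Int) (x : Int) (lo hi : Nat)
    (hmono : ∀ i j, i ≤ j → j < hi → P.getD i 0 ≤ P.getD j 0) (hlo : lo ≤ hi) :
    lo ≤ pvBisectGe P x lo hi ∧ pvBisectGe P x lo hi ≤ hi ∧
      (∀ i, lo ≤ i → i < pvBisectGe P x lo hi → P.getD i 0 < x) ∧
      (pvBisectGe P x lo hi < hi → x ≤ P.getD (pvBisectGe P x lo hi) 0) :=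
  pvBisect_aux P x (hi - lo) lo hi (le_refl _) hmono hlo

-- A's inner scan specification
theorem pvInnerA_spec (items : Int) (l : List pvT) (c off : Int) :
    ∃ k : Nat, pvInnerA items l c off = off + k ∧ k ≤ l.length ∧
      (l ≠ [] → 1 ≤ k) ∧
      (∀ j : Nat, 1 ≤ j → j < k → c + pvWsum (l.take j) < items) ∧
      (k = l.length ∨ items ≤ c + pvWsum (l.take k)) := by
  induction l generalizing c off with
  | nil =>
    exact ⟨0, by simp [pvInnerA], by simp, fun h => absurd rfl h,
      fun j h1 h2 => by omega, Or.inl rfl⟩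
  | cons v rest ih =>
    by_cases hb : items ≤ c + (1 + ((v.2.2.length : Int)))
    · refine ⟨1, ?_, by simp, fun _ => le_refl _, fun j h1 h2 => by omega, Or.inr ?_⟩
      · simp [pvInnerA, hb]
      · simpa [pvWsum_cons, pvWsum_nil, pvW] using hb
    · obtain ⟨k, hk1, hk2, _, hk4, hk5⟩ := ih (c + (1 + ((v.2.2.length : Int)))) (off + 1)
      refine ⟨k + 1, ?_, by simpa using hk2, fun _ => by omega, ?_, ?_⟩
      · rw [show pvInnerA items (v :: rest) c off
            = pvInnerA items rest (c + (1 + ((v.2.2.length : Int)))) (off + 1) by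
          simp [pvInnerA, hb]]
        rw [hk1]
        push_cast
        ring
      · intro j h1 h2
        cases j with
        | zero => omega
        | succ j =>
          cases j with
          | zero =>
            simpa [pvWsum_cons, pvWsum_nil, pvW] using hb
          | succ j =>
            have := hk4 (j + 1) (by omega) (by omega)
            simpa [List.take_succ_cons, pvWsum_cons, pvW, add_assoc] using this
      · rcases hk5 with h | h
        · exact Or.inl (by simp [h])
        · refine Or.inr ?_
          simpa [List.take_succ_cons, pvWsum_cons, pvW, add_assoc] using h

-- the per-slice boundary computed by A's scan equals B's capped binary search
theorem pvEnd_eq (values : List pvT) (items : Int) (start : Nat) (h : start ≤ values.length) :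
    pvInnerA items (values.drop start) 0 (start : Int)
      = ((min (pvBisectGe (0 :: pvPrefix values 0)
            ((0 :: pvPrefix values 0).getD start 0 + items) (start + 1) (values.length + 1))
            values.length : Nat) : Int) := by
  set P : List Int := 0 :: pvPrefix values 0 with hP
  set n := values.length with hn
  set x : Int := P.getD start 0 + items with hx
  have hmono : ∀ i j, i ≤ j → j < n + 1 → P.getD i 0 ≤ P.getD j 0 := by
    intro i j hij hj
    have := pvP_mono values i j hij (by omega)
    rw [← hP] at this
    have hnn : (0:Int) ≤ ((j - i : Nat) : Int) := by positivity
    omega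
  obtain ⟨hb1, hb2, hb3, hb4⟩ := pvBisect_spec P x (start + 1) (n + 1) hmono (by omega)
  obtain ⟨k, hs1, hs2, hs3, hs4, hs5⟩ := pvInnerA_spec items (values.drop start) 0 (start : Int)
  have hdl : (values.drop start).length = n - start := by simp [hn]
  have hbridge : ∀ j : Nat, j ≤ n - start →
      P.getD (start + j) 0 = P.getD start 0 + pvWsum ((values.drop start).take j) := by
    intro j hj
    rw [hP, pvPrefix_getD values 0 (start + j) (by omega), pvPrefix_getD values 0 start h]
    rw [show values.take (start + j) = values.take start ++ (values.drop start).take j from by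
      rw [← List.take_add]]
    rw [pvWsum_append]
    ring
  set r := pvBisectGe P x (start + 1) (n + 1) with hr
  rw [hs1]
  by_cases hsn : start = n
  · have hk0 : k = 0 := by omega
    have hrn : r = n + 1 := by omega
    subst hk0
    simp [hrn, hsn]
  · -- start < n
    have hne : values.drop start ≠ [] := by
      intro hemp
      rw [hemp] at hdl
      simp at hdl
      omega
    have hk1 : 1 ≤ k := hs3 hne
    have p1 : ∀ i, start < i → i < start + k → P.getD i 0 < x := by
      intro i h1 h2
      have := hs4 (i - start) (by omega) (by omega)
      have hb := hbridge (i - start) (by omega)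
      rw [show start + (i - start) = i by omega] at hb
      omega
    have p2 : start + k = n ∨ x ≤ P.getD (start + k) 0 := by
      rcases hs5 with hh | hh
      · exact Or.inl (by omega)
      · refine Or.inr ?_
        have hb := hbridge k (by omega)
        omega
    have q0 : start < min r n := by omega
    have q1 : ∀ i, start < i → i < min r n → P.getD i 0 < x := by
      intro i h1 h2
      exact hb3 i (by omega) (by omega)
    have q2 : min r n = n ∨ x ≤ P.getD (min r n) 0 := by
      by_cases hrc : r ≤ n
      · have : min r n = r := by omega
        rw [this]
        exact Or.inr (hb4 (by omega))
      · exact Or.inl (by omega)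
    have hkey : start + k = min r n := by
      rcases lt_trichotomy (start + k) (min r n) with hlt | heq | hgt
      · have hlx := q1 (start + k) (by omega) hlt
        rcases p2 with hh | hh <;> omega
      · exact heq
      · have hlx := p1 (min r n) q0 hgt
        rcases q2 with hh | hh <;> omega
    push_cast
    omega

-- A's outer loop (Int offset, linear scans) and B's outer loop (Nat start, binary search)
-- produce the same slice list from matching states
theorem pvFold_eq (values : List pvT) (slices items : Int) :
    ∀ (idxs : List Int) (offB : Nat) (acc : List (List pvT)), offB ≤ values.length →
      (idxs.foldl (fun (st : Int × List (List pvT)) sn =>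
          ((if slices == sn + 1 then ((values.length : Int))
            else pvInnerA items (PySem.List.slice values (some st.1) none) 0 st.1),
           st.2 ++ [PySem.List.slice values (some st.1)
             (some (if slices == sn + 1 then ((values.length : Int))
                    else pvInnerA items (PySem.List.slice values (some st.1) none) 0 st.1))]))
        ((offB : Int), acc)).2
      = (idxs.foldl (fun (st : Nat × List (List pvT)) sn =>
          ((if sn == slices - 1 then values.length
            else min (pvBisectGe (0 :: pvPrefix values 0)
              ((0 :: pvPrefix values 0).getD st.1 0 + items) (st.1 + 1) (values.length + 1))
              values.length),
           st.2 ++ [(values.drop st.1).take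
             ((if sn == slices - 1 then values.length
               else min (pvBisectGe (0 :: pvPrefix values 0)
                 ((0 :: pvPrefix values 0).getD st.1 0 + items) (st.1 + 1) (values.length + 1))
                 values.length) - st.1)]))
        (offB, acc)).2 := by
  intro idxs
  induction idxs with
  | nil => intro offB acc h; rfl
  | cons sn rest ih =>
    intro offB acc h
    have hcond : (slices == sn + 1) = (sn == slices - 1) := by
      by_cases hc : slices = sn + 1
      · simp [hc]
      · have hc2 : ¬ sn = slices - 1 := by omega
        simp [hc, hc2]
    simp only [List.foldl_cons, hcond]
    by_cases hl : (sn == slices - 1) = true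
    · simp only [hl, if_true]
      rw [PySem.List.slice_natCast]
      exact ih values.length (acc ++ [(values.drop offB).take (values.length - offB)]) (le_refl _)
    · rw [Bool.not_eq_true] at hl
      simp only [hl, Bool.false_eq_true, if_false]
      rw [PySem.List.slice_from_natCast]
      rw [pvEnd_eq values items offB h]
      rw [PySem.List.slice_natCast]
      exact ih _ _ (by omega)

-- ===== VERDICT (by name: the statement is the Claim_ definition above) =====
theorem slice_index_py_spec : Claim_equal_slice_index_py := by
  intro values slices _hdom _hpre
  unfold Spec_slice_index_py slice_index_py slice_index_py_alt
  simp only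
  rw [pvFoldl_wsum values 0, pvPrefix_getLastD values 0]
  rw [show ((0:Int), ([] : List (List pvT))) = (((0:Nat) : Int), ([] : List (List pvT))) by norm_num]
  exact pvFold_eq values slices
    (PySem.Int.floordiv (0 + pvWsum values) slices)
    (PySem.List.pyRange 0 slices 1) 0 [] (by omega)
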